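-- pv_equiv track=rewrite | github.com/kashishbajaj0344-crypto/Kalki | modules/agents/agent_manager.py | _parse_execution_plan
-- ===== SOURCE A (Python) =====
-- from typing import Dict, List, Optional, Any, Tuple
--
-- def _parse_execution_plan(plan_response: str) -> Dict[str, Any]:
--     """
--     Parse LLM-generated execution plan into structured format
--
--     Args:
--         plan_response: Raw LLM response with execution plan
--
--     Returns:
--         Structured execution plan
--     """
--     plan = {
--         "subtasks": [],
--         "execution_order": [],
--         "dependencies": [],
--         "fallback_strategies": []
--     }
--
--     current_section = None
--     lines = plan_response.split('\n')
--
--     for line in lines: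
--         line = line.strip()
--         if not line:
--             continue
--
--         if line.startswith('SUBTASKS:'):
--             current_section = 'subtasks'
--             continue
--         elif line.startswith('EXECUTION_ORDER:'):
--             current_section = 'execution_order'
--             continue
--         elif line.startswith('DEPENDENCIES:'):
--             current_section = 'dependencies'
--             continue
--         elif line.startswith('FALLBACK_STRATEGIES:'):
--             current_section = 'fallback_strategies'
--             continue
--
--         if current_section and line.startswith('- ') or line[0].isdigit():
--             content = line.lstrip('- ').lstrip('0123456789. ')
--             if current_section == 'subtasks':
--                 plan['subtasks'].append(content)
--             elif current_section == 'execution_order':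
--                 plan['execution_order'].append(content)
--             elif current_section == 'dependencies':
--                 plan['dependencies'].append(content)
--             elif current_section == 'fallback_strategies':
--                 plan['fallback_strategies'].append(content)
--
--     return plan
-- ===== SOURCE B (Python) =====
-- def _parse_execution_plan(plan_response):
--     headers = [("SUBTASKS:", "subtasks"), ("EXECUTION_ORDER:", "execution_order"),
--                ("DEPENDENCIES:", "dependencies"), ("FALLBACK_STRATEGIES:", "fallback_strategies")]
--     # pass 1: tag every non-blank, non-header line with the section it belongs to
--     tagged = []
--     section = None
--     for raw in plan_response.split('\n'):
--         line = raw.strip()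
--         if not line:
--             continue
--         header = next((key for prefix, key in headers if line.startswith(prefix)), None)
--         if header is not None:
--             section = header
--         elif section is not None:
--             tagged.append((section, line))
--     # pass 2: per section, keep the item lines and clean them
--     return {key: [l.lstrip('- ').lstrip('0123456789. ')
--                   for sec, l in tagged
--                   if sec == key and (l.startswith('- ') or l[0].isdigit())]
--             for _, key in headers}
-- ===== Notes on version B (the rewrite author's own statement) =====
-- stated objective: alternative
-- what changed: A's single loop with an inline header elif-chain and per-section append branches is replaced by a two-pass decomposition: a table-driven first pass tags each non-blank non-header line with its active section, then a per-section filter-and-clean comprehension builds the four lists.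
import Mathlib
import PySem

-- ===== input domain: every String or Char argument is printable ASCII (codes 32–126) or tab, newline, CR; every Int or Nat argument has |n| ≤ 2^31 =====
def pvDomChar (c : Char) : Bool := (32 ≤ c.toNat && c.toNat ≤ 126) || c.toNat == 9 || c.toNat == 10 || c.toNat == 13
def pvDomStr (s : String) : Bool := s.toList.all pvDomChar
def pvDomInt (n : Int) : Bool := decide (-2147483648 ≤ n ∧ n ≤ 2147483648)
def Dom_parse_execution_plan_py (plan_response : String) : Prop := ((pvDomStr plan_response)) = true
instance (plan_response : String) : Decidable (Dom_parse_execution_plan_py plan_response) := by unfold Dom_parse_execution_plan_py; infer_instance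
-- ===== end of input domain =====

-- B replaces A's single loop with an inline section branch chain by a two-pass decomposition
-- (tag each line with its section via a header table, then per-section filter-and-clean);
-- objective: alternative decomposition, same cost.

-- shared stdlib primitive: Python's str.lstrip(chars) — drop leading chars belonging to the set (exact)
def pvLstripChars (cs : List Char) (chars : List Char) : List Char :=
  cs.dropWhile (· ∈ chars)

-- line.lstrip('- ').lstrip('0123456789. ')  (both Pythons contain this same expression)
def pvClean (line : String) : String :=
  String.ofList (pvLstripChars (pvLstripChars line.toList ['-', ' '])
    ['0','1','2','3','4','5','6','7','8','9','.',' '])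

-- line[0].isdigit() — both ports only apply it to nonempty lines, as Python does
def pvFirstDigit (line : String) : Bool :=
  match line.toList with
  | c :: _ => PySem.Chars.isdigit c
  | [] => false

-- ===== PORT A =====
-- the for-loop of A: state = (current_section, the four lists of plan)
def pvLoopA : List String → Option String → List String → List String → List String → List String →
    (List String × List String × List String × List String)
  | [], _, su, eo, de, fb => (su, eo, de, fb)
  | raw :: rest, cur, su, eo, de, fb =>
    let line := PySem.Str.strip raw
    if line = "" then pvLoopA rest cur su eo de fb
    else if PySem.Str.startswith line "SUBTASKS:" then pvLoopA rest (some "subtasks") su eo de fb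
    else if PySem.Str.startswith line "EXECUTION_ORDER:" then pvLoopA rest (some "execution_order") su eo de fb
    else if PySem.Str.startswith line "DEPENDENCIES:" then pvLoopA rest (some "dependencies") su eo de fb
    else if PySem.Str.startswith line "FALLBACK_STRATEGIES:" then pvLoopA rest (some "fallback_strategies") su eo de fb
    -- Python: `if current_section and line.startswith('- ') or line[0].isdigit():`
    -- (the `and` binds tighter than the `or`)
    else if (cur.isSome && PySem.Str.startswith line "- ") || pvFirstDigit line then
      let content := pvClean line
      match cur with
      | some "subtasks" => pvLoopA rest cur (su ++ [content]) eo de fb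
      | some "execution_order" => pvLoopA rest cur su (eo ++ [content]) de fb
      | some "dependencies" => pvLoopA rest cur su eo (de ++ [content]) fb
      | some "fallback_strategies" => pvLoopA rest cur su eo de (fb ++ [content])
      | _ => pvLoopA rest cur su eo de fb
    else pvLoopA rest cur su eo de fb

def parse_execution_plan_py (plan_response : String) : List (String × List String) :=
  match pvLoopA ((PySem.Str.split? plan_response "\n").getD []) none [] [] [] [] with
  | (su, eo, de, fb) =>
    [("subtasks", su), ("execution_order", eo), ("dependencies", de), ("fallback_strategies", fb)]

-- ===== PORT B =====
def pvHeadersB : List (String × String) :=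
  [("SUBTASKS:", "subtasks"), ("EXECUTION_ORDER:", "execution_order"),
   ("DEPENDENCIES:", "dependencies"), ("FALLBACK_STRATEGIES:", "fallback_strategies")]

-- pass 1: tag every non-blank, non-header line with the active section
def pvTagB : List String → Option String → List (String × String)
  | [], _ => []
  | raw :: rest, sec =>
    let line := PySem.Str.strip raw
    if line = "" then pvTagB rest sec
    else
      match pvHeadersB.find? (fun pk => PySem.Str.startswith line pk.1) with
      | some pk => pvTagB rest (some pk.2)
      | none =>
        match sec with
        | some s => (s, line) :: pvTagB rest sec
        | none => pvTagB rest sec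

def pvIsItemB (l : String) : Bool :=
  PySem.Str.startswith l "- " || pvFirstDigit l

-- pass 2: per section, keep the item lines and clean them
def pvItemsB (key : String) (tagged : List (String × String)) : List String :=
  (tagged.filter (fun sl => sl.1 == key && pvIsItemB sl.2)).map (fun sl => pvClean sl.2)

def parse_execution_plan_py_alt (plan_response : String) : List (String × List String) :=
  let tagged := pvTagB ((PySem.Str.split? plan_response "\n").getD []) none
  pvHeadersB.map (fun pk => (pk.2, pvItemsB pk.2 tagged))

-- ===== PRECONDITION & SPEC =====
def Spec_parse_execution_plan_py (plan_response : String) (out : List (String × List String)) : Prop := out = parse_execution_plan_py_alt plan_response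
instance (plan_response : String) (out : List (String × List String)) : Decidable (Spec_parse_execution_plan_py plan_response out) := by unfold Spec_parse_execution_plan_py; infer_instance

-- ===== CLAIM (what is proved, stated in full; the proofs are below) =====
def Claim_equal_parse_execution_plan_py : Prop := ∀ (plan_response : String), Dom_parse_execution_plan_py plan_response → Spec_parse_execution_plan_py plan_response (parse_execution_plan_py plan_response)

-- ===== LEMMAS AND PROOFS =====

-- the loop of A computes, for each of the four keys, the per-section items of the tagged lines
set_option maxHeartbeats 2000000 in
theorem pvLoopA_eq (lines : List String) :
    ∀ (cur : Option String) (su eo de fb : List String),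
    pvLoopA lines cur su eo de fb =
      (su ++ pvItemsB "subtasks" (pvTagB lines cur),
       eo ++ pvItemsB "execution_order" (pvTagB lines cur),
       de ++ pvItemsB "dependencies" (pvTagB lines cur),
       fb ++ pvItemsB "fallback_strategies" (pvTagB lines cur)) := by
  induction lines with
  | nil => intro cur su eo de fb; simp [pvLoopA, pvTagB, pvItemsB]
  | cons raw rest ih =>
    intro cur su eo de fb
    simp only [pvLoopA, pvTagB]
    by_cases h0 : PySem.Str.strip raw = ""
    · simp [h0, ih]
    · have h0' : PySem.Chars.strip raw.toList ≠ [] := by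
        simpa [PySem.Str.strip, String.ext_iff] using h0
      by_cases h1 : PySem.Str.startswith (PySem.Str.strip raw) "SUBTASKS:" = true
      · simp at h1
        simp [pvHeadersB, List.find?, h0, h0', h1, ih]
      · simp at h1
        by_cases h2 : PySem.Str.startswith (PySem.Str.strip raw) "EXECUTION_ORDER:" = true
        · simp at h2
          simp [pvHeadersB, List.find?, h0, h0', h1, h2, ih]
        · simp at h2
          by_cases h3 : PySem.Str.startswith (PySem.Str.strip raw) "DEPENDENCIES:" = true
          · simp at h3
            simp [pvHeadersB, List.find?, h0, h0', h1, h2, h3, ih]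
          · simp at h3
            by_cases h4 : PySem.Str.startswith (PySem.Str.strip raw) "FALLBACK_STRATEGIES:" = true
            · simp at h4
              simp [pvHeadersB, List.find?, h0, h0', h1, h2, h3, h4, ih]
            · simp at h4
              -- not a header line
              simp only [pvHeadersB, List.find?, h1, h2, h3, h4]
              cases cur with
              | none => simp [h0, h0', h1, h2, h3, h4, ih, pvItemsB]
              | some s =>
                by_cases hi : pvIsItemB (PySem.Str.strip raw) = true
                · simp only [pvIsItemB] at hi
                  simp at hi
                  -- item line: appended to the current section's list iff s is one of the keys
                  by_cases e1 : s = "subtasks"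
                  · subst e1; simp [h0, h0', h1, h2, h3, h4, hi, ih, pvItemsB, pvIsItemB]
                  · by_cases e2 : s = "execution_order"
                    · subst e2; simp [h0, h0', h1, h2, h3, h4, hi, ih, pvItemsB, pvIsItemB]
                    · by_cases e3 : s = "dependencies"
                      · subst e3; simp [h0, h0', h1, h2, h3, h4, hi, ih, pvItemsB, pvIsItemB]
                      · by_cases e4 : s = "fallback_strategies"
                        · subst e4; simp [h0, h0', h1, h2, h3, h4, hi, ih, pvItemsB, pvIsItemB]
                        · simp [h0, h0', h1, h2, h3, h4, hi, ih, pvItemsB, pvIsItemB, e1, e2, e3, e4]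
                · simp only [pvIsItemB] at hi
                  simp at hi
                  obtain ⟨hiA, hiB⟩ := hi
                  have hii : pvIsItemB (PySem.Str.strip raw) = false := by
                    simp [pvIsItemB, hiA, hiB]
                  simp [h0, h0', h1, h2, h3, h4, hiA, hiB, hii, ih, pvItemsB]

-- ===== VERDICT (by name: the statement is the Claim_ definition above) =====
theorem parse_execution_plan_py_spec : Claim_equal_parse_execution_plan_py := by
  intro s _
  unfold Spec_parse_execution_plan_py parse_execution_plan_py parse_execution_plan_py_alt
  simp [pvLoopA_eq, pvHeadersB, pvItemsB]
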